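-- pv_equiv track=rewrite | github.com/MieskeB/advent-of-code | aoc-2023/day1.py | isNumberWord
-- ===== SOURCE A (Python) =====
-- def isNumberWord(line, location):
--     number_words = {
--         "one": '1',
--         "two": '2',
--         "three": '3',
--         "four": '4',
--         "five": '5',
--         "six": '6',
--         "seven": '7',
--         "eight": '8',
--         "nine": '9',
--     }
--
--     for word, value in number_words.items():
--         if line[location:].startswith(word):
--             return value
--     return None
-- ===== SOURCE B (Python) =====
-- def isNumberWord(line, location):
--     # Decision tree on the first character; no dict, no loop over words.
--     rest = line[location:][:5]
--     first = rest[:1]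
--     if first == 'o':
--         return '1' if rest[:3] == 'one' else None
--     if first == 't':
--         if rest[:3] == 'two':
--             return '2'
--         return '3' if rest == 'three' else None
--     if first == 'f':
--         if rest[:4] == 'four':
--             return '4'
--         return '5' if rest[:4] == 'five' else None
--     if first == 's':
--         if rest[:3] == 'six':
--             return '6'
--         return '7' if rest == 'seven' else None
--     if first == 'e':
--         return '8' if rest == 'eight' else None
--     if first == 'n':
--         return '9' if rest[:4] == 'nine' else None
--     return None
-- ===== Notes on version B (the rewrite author's own statement) =====
-- stated objective: alternative
-- what changed: B replaces A's dict and its loop over the nine (word,value) pairs with startswith by a branching decision tree: it slices at most five characters once, dispatches on the first character, and compares at most two fixed-length slices; correct because the nine words are pairwise non-prefix and grouped by first letter.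
import Mathlib
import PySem

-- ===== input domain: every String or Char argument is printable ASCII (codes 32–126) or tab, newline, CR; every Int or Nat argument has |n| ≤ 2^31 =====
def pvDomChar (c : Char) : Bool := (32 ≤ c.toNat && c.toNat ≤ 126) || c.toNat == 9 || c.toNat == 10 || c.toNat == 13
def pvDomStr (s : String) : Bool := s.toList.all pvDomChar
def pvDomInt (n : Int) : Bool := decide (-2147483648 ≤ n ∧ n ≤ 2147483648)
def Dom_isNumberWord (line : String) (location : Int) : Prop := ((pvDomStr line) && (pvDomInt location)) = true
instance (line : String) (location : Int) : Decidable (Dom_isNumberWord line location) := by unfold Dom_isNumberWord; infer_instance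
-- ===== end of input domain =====

-- B replaces A's dict-and-loop (scan the nine words with startswith) by a loop-free
-- decision tree on the first character with fixed-length slice comparisons (objective: alternative).

-- ===== PORT A =====
-- the number_words dict A builds
def numberWordsA : PySem.Dict String String :=
  PySem.Dict.ofList [("one","1"),("two","2"),("three","3"),("four","4"),
                     ("five","5"),("six","6"),("seven","7"),("eight","8"),("nine","9")]

-- 'for word, value in number_words.items(): if line[location:].startswith(word): return value'
def goA (rest : String) : List (String × String) → Option String
  | [] => none
  | (w, v) :: ps => if PySem.Str.startswith rest w then some v else goA rest ps

def isNumberWord (line : String) (location : Int) : Option String :=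
  goA (PySem.Str.slice line (some location) none) numberWordsA.items

-- ===== PORT B =====
-- rest = line[location:][:5]; first = rest[:1]; then a branch tree on first,
-- comparing fixed-length slices of rest (step-for-step port of Source B)
def isNumberWord_alt (line : String) (location : Int) : Option String :=
  let rest := PySem.Str.slice (PySem.Str.slice line (some location) none) none (some 5)
  let first := PySem.Str.slice rest none (some 1)
  if first = "o" then
    (if PySem.Str.slice rest none (some 3) = "one" then some "1" else none)
  else if first = "t" then
    (if PySem.Str.slice rest none (some 3) = "two" then some "2"
     else if rest = "three" then some "3" else none)
  else if first = "f" then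
    (if PySem.Str.slice rest none (some 4) = "four" then some "4"
     else if PySem.Str.slice rest none (some 4) = "five" then some "5" else none)
  else if first = "s" then
    (if PySem.Str.slice rest none (some 3) = "six" then some "6"
     else if rest = "seven" then some "7" else none)
  else if first = "e" then
    (if rest = "eight" then some "8" else none)
  else if first = "n" then
    (if PySem.Str.slice rest none (some 4) = "nine" then some "9" else none)
  else none

-- ===== PRECONDITION & SPEC =====
def Spec_isNumberWord (line : String) (location : Int) (out : Option String) : Prop := out = isNumberWord_alt line location
instance (line : String) (location : Int) (out : Option String) : Decidable (Spec_isNumberWord line location out) := by unfold Spec_isNumberWord; infer_instance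

-- ===== CLAIM (what is proved, stated in full; the proofs are below) =====
def Claim_equal_isNumberWord : Prop := ∀ (line : String) (location : Int), Dom_isNumberWord line location → Spec_isNumberWord line location (isNumberWord line location)

-- ===== LEMMAS AND PROOFS =====

lemma itemsA : numberWordsA.items =
    [("one","1"),("two","2"),("three","3"),("four","4"),
     ("five","5"),("six","6"),("seven","7"),("eight","8"),("nine","9")] := by rfl

lemma sw (rest w : String) :
    PySem.Str.startswith rest w = decide (w.toList <+: rest.toList) := by
  have h := PySem.Chars.startswith_iff rest.toList w.toList
  by_cases hp : w.toList <+: rest.toList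
  · simp [hp, h.mpr hp]
  · simp only [hp, decide_false]
    simpa using fun hc => hp (h.mp hc)

lemma slice_take (s : String) (b : Int) (hb : 0 ≤ b) :
    (PySem.Str.slice s none (some b)).toList = s.toList.take b.toNat := by
  simp [PySem.List.slice_to _ hb]

-- string equality of a fixed-length take of rest with a word ↔ list-level equality
lemma str_eq_iff (s t : String) : s = t ↔ s.toList = t.toList := by
  constructor
  · intro h; rw [h]
  · intro h; exact String.ext h

-- take n (take 5 l) = w (with w.length = n ≤ 5) implies w <+: l
lemma prefix_of_take_take {l w : List Char} {n : Nat}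
    (h : (l.take 5).take n = w) : w <+: l := by
  subst h
  exact ((l.take 5).take_prefix n).trans (l.take_prefix 5)

lemma tree_eq (s : String) : goA s numberWordsA.items =
    (let rest := PySem.Str.slice s none (some 5)
     let first := PySem.Str.slice rest none (some 1)
     if first = "o" then
       (if PySem.Str.slice rest none (some 3) = "one" then some "1" else none)
     else if first = "t" then
       (if PySem.Str.slice rest none (some 3) = "two" then some "2"
        else if rest = "three" then some "3" else none)
     else if first = "f" then
       (if PySem.Str.slice rest none (some 4) = "four" then some "4"
        else if PySem.Str.slice rest none (some 4) = "five" then some "5" else none)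
     else if first = "s" then
       (if PySem.Str.slice rest none (some 3) = "six" then some "6"
        else if rest = "seven" then some "7" else none)
     else if first = "e" then
       (if rest = "eight" then some "8" else none)
     else if first = "n" then
       (if PySem.Str.slice rest none (some 4) = "nine" then some "9" else none)
     else none) := by
  rw [itemsA]
  simp only [goA, sw, str_eq_iff, slice_take _ _ (by norm_num : (0:Int) ≤ 5),
             slice_take _ _ (by norm_num : (0:Int) ≤ 1),
             slice_take _ _ (by norm_num : (0:Int) ≤ 3),
             slice_take _ _ (by norm_num : (0:Int) ≤ 4)]
  generalize s.toList = l
  by_cases h1 : ['o','n','e'] <+: l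
  · obtain ⟨t, rfl⟩ := h1
    simp
  by_cases h2 : ['t','w','o'] <+: l
  · obtain ⟨t, rfl⟩ := h2
    simp
  by_cases h3 : ['t','h','r','e','e'] <+: l
  · obtain ⟨t, rfl⟩ := h3
    simp
  by_cases h4 : ['f','o','u','r'] <+: l
  · obtain ⟨t, rfl⟩ := h4
    simp
  by_cases h5 : ['f','i','v','e'] <+: l
  · obtain ⟨t, rfl⟩ := h5
    simp
  by_cases h6 : ['s','i','x'] <+: l
  · obtain ⟨t, rfl⟩ := h6
    simp
  by_cases h7 : ['s','e','v','e','n'] <+: l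
  · obtain ⟨t, rfl⟩ := h7
    simp
  by_cases h8 : ['e','i','g','h','t'] <+: l
  · obtain ⟨t, rfl⟩ := h8
    simp
  by_cases h9 : ['n','i','n','e'] <+: l
  · obtain ⟨t, rfl⟩ := h9
    simp
  · have e1 : ¬ ((l.take 5).take 3 = ['o','n','e']) :=
      fun h => h1 (prefix_of_take_take h)
    have e2 : ¬ ((l.take 5).take 3 = ['t','w','o']) :=
      fun h => h2 (prefix_of_take_take h)
    have e3 : ¬ (l.take 5 = ['t','h','r','e','e']) :=
      fun h => h3 (h ▸ l.take_prefix 5)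
    have e4 : ¬ ((l.take 5).take 4 = ['f','o','u','r']) :=
      fun h => h4 (prefix_of_take_take h)
    have e5 : ¬ ((l.take 5).take 4 = ['f','i','v','e']) :=
      fun h => h5 (prefix_of_take_take h)
    have e6 : ¬ ((l.take 5).take 3 = ['s','i','x']) :=
      fun h => h6 (prefix_of_take_take h)
    have e7 : ¬ (l.take 5 = ['s','e','v','e','n']) :=
      fun h => h7 (h ▸ l.take_prefix 5)
    have e8 : ¬ (l.take 5 = ['e','i','g','h','t']) :=
      fun h => h8 (h ▸ l.take_prefix 5)
    have e9 : ¬ ((l.take 5).take 4 = ['n','i','n','e']) :=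
      fun h => h9 (prefix_of_take_take h)
    simp [h1, h2, h3, h4, h5, h6, h7, h8, h9, e1, e2, e3, e4, e5, e6, e7, e8, e9]

-- ===== VERDICT (by name: the statement is the Claim_ definition above) =====
theorem isNumberWord_spec : Claim_equal_isNumberWord := by
  intro line location _
  unfold Spec_isNumberWord isNumberWord isNumberWord_alt
  exact tree_eq _
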